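-- pv_equiv track=rewrite | github.com/DMtoolsfun/dmtools-frontend | extract_shared_css.py | selector_matches
-- ===== SOURCE A (Python) =====
-- def selector_matches(selector: str, base: str) -> bool:
--     s = selector.strip()
--     b = base.strip()
--     if not s or not b:
--         return False
--     if s == b:
--         return True
--     for suffix in (" ", ":", "::", ".", "#", "[", ">", "+", "~"):
--         if s.startswith(b + suffix):
--             return True
--     return False
-- ===== SOURCE B (Python) =====
-- def selector_matches(selector: str, base: str) -> bool:
--     s = selector.strip()
--     b = base.strip()
--     if not s or not b:
--         return False
--     # single simultaneous scan: walk both strings char by char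
--     i = 0
--     while i < len(b):
--         if i >= len(s) or s[i] != b[i]:
--             return False
--         i += 1
--     return i == len(s) or s[i] in " :.#[>+~"
-- ===== Notes on version B (the rewrite author's own statement) =====
-- stated objective: alternative
-- what changed: Replaces the 9-way suffix loop of startswith calls (each rescanning the prefix) with one simultaneous char-by-char scan of selector and base via an index; the scan's stopping position alone decides exact match vs delimiter-continuation ('::' is subsumed by ':').
import Mathlib
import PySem

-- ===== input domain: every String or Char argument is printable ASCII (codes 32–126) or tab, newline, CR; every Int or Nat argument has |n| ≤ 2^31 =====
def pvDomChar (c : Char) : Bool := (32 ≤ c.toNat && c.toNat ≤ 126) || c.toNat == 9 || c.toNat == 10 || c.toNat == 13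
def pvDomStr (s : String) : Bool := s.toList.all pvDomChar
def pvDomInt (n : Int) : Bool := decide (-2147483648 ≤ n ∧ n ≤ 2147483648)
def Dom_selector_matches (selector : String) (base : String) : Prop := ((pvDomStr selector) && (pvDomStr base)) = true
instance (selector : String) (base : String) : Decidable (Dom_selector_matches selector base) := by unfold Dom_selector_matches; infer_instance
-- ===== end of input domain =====

-- B replaces A's 9-way suffix loop of startswith calls by one simultaneous char-by-char scan
-- of selector and base; the scan's stopping position decides the answer (alternative decomposition).

-- ===== PORT A =====
def selector_matches (selector : String) (base : String) : Bool :=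
  let s := PySem.Chars.strip selector.toList
  let b := PySem.Chars.strip base.toList
  if s = [] ∨ b = [] then false
  else if s = b then true
  else [[' '], [':'], [':', ':'], ['.'], ['#'], ['['], ['>'], ['+'], ['~']].any
    (fun suffix => PySem.Chars.startswith s (b ++ suffix))

-- ===== PORT B =====
-- the while-loop of Source B as structural recursion on the two character lists:
-- advance while base has characters; on exit decide by what remains of s.
def pvScan (s b : List Char) : Bool :=
  match b, s with
  | bc :: bt, sc :: st => if sc = bc then pvScan st bt else false
  | _ :: _, [] => false
  | [], [] => true
  | [], c :: _ => [' ', ':', '.', '#', '[', '>', '+', '~'].contains c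

def selector_matches_alt (selector : String) (base : String) : Bool :=
  let s := PySem.Chars.strip selector.toList
  let b := PySem.Chars.strip base.toList
  if s = [] ∨ b = [] then false
  else pvScan s b

-- ===== PRECONDITION & SPEC =====
def Spec_selector_matches (selector : String) (base : String) (out : Bool) : Prop := out = selector_matches_alt selector base
instance (selector : String) (base : String) (out : Bool) : Decidable (Spec_selector_matches selector base out) := by unfold Spec_selector_matches; infer_instance

-- ===== CLAIM (what is proved, stated in full; the proofs are below) =====
def Claim_equal_selector_matches : Prop := ∀ (selector : String) (base : String), Dom_selector_matches selector base → Spec_selector_matches selector base (selector_matches selector base)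

-- ===== LEMMAS AND PROOFS =====

theorem pvScan_append (b r : List Char) :
    pvScan (b ++ r) b = (match r with
      | [] => true
      | c :: _ => [' ', ':', '.', '#', '[', '>', '+', '~'].contains c) := by
  induction b with
  | nil => cases r <;> rfl
  | cons bc bt ih => simpa [pvScan] using ih

theorem pvScan_not_prefix (b s : List Char) (h : ¬ b <+: s) : pvScan s b = false := by
  induction b generalizing s with
  | nil => exact absurd (List.nil_prefix) h
  | cons bc bt ih =>
    cases s with
    | nil => rfl
    | cons sc st =>
      by_cases hc : sc = bc
      · subst hc
        simp only [pvScan]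
        exact ih st (fun hp => h (by simpa [List.cons_prefix_cons] using hp))
      · simp [pvScan, hc]

-- core: for stripped nonempty s, b the two bodies agree
theorem core_eq (s b : List Char) :
    (if s = b then true
     else [[' '], [':'], [':', ':'], ['.'], ['#'], ['['], ['>'], ['+'], ['~']].any
       (fun suffix => PySem.Chars.startswith s (b ++ suffix)))
    = pvScan s b := by
  by_cases hp : b <+: s
  · obtain ⟨rest, hrest⟩ := hp
    subst hrest
    rw [pvScan_append]
    rcases rest with _ | ⟨c, t⟩
    · simp
    · rw [if_neg (by simp)]
      rw [Bool.eq_iff_iff]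
      simp only [List.any_eq_true, List.mem_cons, List.not_mem_nil, or_false,
        PySem.Chars.startswith_iff, List.prefix_append_right_inj,
        List.contains_eq_mem, decide_eq_true_eq]
      constructor
      · rintro ⟨suf, hsuf, hpre⟩
        rcases hsuf with rfl|rfl|rfl|rfl|rfl|rfl|rfl|rfl|rfl <;>
          simp only [List.cons_prefix_cons, List.nil_prefix, and_true] at hpre <;> aesop
      · intro hc
        rcases hc with rfl|rfl|rfl|rfl|rfl|rfl|rfl|rfl <;> aesop
  · rw [pvScan_not_prefix b s hp, if_neg (fun h => hp (by rw [h]))]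
    rw [List.any_eq_false]
    intro suf _ hst
    exact hp ((List.prefix_append b suf).trans ((PySem.Chars.startswith_iff _ _).mp hst))

-- ===== VERDICT =====
theorem selector_matches_spec : Claim_equal_selector_matches := by
  intro selector base _
  unfold Spec_selector_matches selector_matches selector_matches_alt
  set s := PySem.Chars.strip selector.toList
  set b := PySem.Chars.strip base.toList
  by_cases h : s = [] ∨ b = []
  · simp [h]
  · simp only [if_neg h]
    exact core_eq s b
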